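-- pv_equiv track=rewrite | github.com/Shibani987/ghostfix-ai | core/framework_fixer.py | _first_ollama_fetch_line
-- ===== SOURCE A (Python) =====
-- def _first_ollama_fetch_line(text: str) -> int:
--     lines = text.splitlines(keepends=True)
--     for index, line in enumerate(lines):
--         if "fetch(" in line and ("OLLAMA_BASE_URL" in line or "ollama" in line.lower() or "baseUrl" in line):
--             return index
--     for index, line in enumerate(lines):
--         if "fetch(" in line:
--             return index
--     return -1
-- ===== SOURCE B (Python) =====
-- def _first_ollama_fetch_line(text: str) -> int:
--     fallback = -1
--     for index, line in enumerate(text.splitlines(keepends=True)):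
--         has_fetch = "fetch(" in line
--         if has_fetch and ("OLLAMA_BASE_URL" in line or "ollama" in line.lower() or "baseUrl" in line):
--             return index
--         if has_fetch and fallback == -1:
--             fallback = index
--     return fallback
-- ===== Notes on version B (the rewrite author's own statement) =====
-- stated objective: simpler
-- what changed: Replaces A's two sequential scans of the line list by one enumerate pass that returns immediately on a preferred (ollama-marked) fetch line and remembers the first plain fetch( line as a fallback.
import Mathlib
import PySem

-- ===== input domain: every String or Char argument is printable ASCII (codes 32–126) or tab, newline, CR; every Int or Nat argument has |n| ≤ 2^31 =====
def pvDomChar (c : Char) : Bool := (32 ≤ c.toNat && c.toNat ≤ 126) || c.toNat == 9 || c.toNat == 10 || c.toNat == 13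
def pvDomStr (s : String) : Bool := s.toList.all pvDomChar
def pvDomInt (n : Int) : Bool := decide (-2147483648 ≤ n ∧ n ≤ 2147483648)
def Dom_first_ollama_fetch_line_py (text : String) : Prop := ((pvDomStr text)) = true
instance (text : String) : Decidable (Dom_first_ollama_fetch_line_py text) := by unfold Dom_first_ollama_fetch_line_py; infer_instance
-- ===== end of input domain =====

-- B merges A's two sequential scans into one enumerate pass with a remembered fallback index (objective: simpler).

-- ===== PORT A =====
-- hand port of str.splitlines(keepends=True): exact on the domain (the only line-break
-- characters admitted by Dom_ are '\n', '\r' and the pair '\r\n')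
def pvSplitKeep (acc : List Char) : List Char → List (List Char)
  | [] => if acc.isEmpty then [] else [acc.reverse]
  | '\r' :: '\n' :: rest => (acc.reverse ++ ['\r', '\n']) :: pvSplitKeep [] rest
  | c :: rest =>
      if c = '\n' ∨ c = '\r' then (acc.reverse ++ [c]) :: pvSplitKeep [] rest
      else pvSplitKeep (c :: acc) rest

-- '"fetch(" in line' (shared subexpression of both Pythons)
def pvHasFetch (l : List Char) : Bool := PySem.Chars.isIn "fetch(".toList l

-- the preferred condition of both Pythons, evaluated in A's operand order
def pvPref (l : List Char) : Bool :=
  pvHasFetch l &&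
    (PySem.Chars.isIn "OLLAMA_BASE_URL".toList l ||
     PySem.Chars.isIn "ollama".toList (PySem.Chars.lower l) ||
     PySem.Chars.isIn "baseUrl".toList l)

-- A's first for-loop
def pvScanPref (i : Int) : List (List Char) → Option Int
  | [] => none
  | l :: ls => if pvPref l then some i else pvScanPref (i + 1) ls

-- A's second for-loop
def pvScanFetch (i : Int) : List (List Char) → Option Int
  | [] => none
  | l :: ls => if pvHasFetch l then some i else pvScanFetch (i + 1) ls

def first_ollama_fetch_line_py (text : String) : Int :=
  let lines := pvSplitKeep [] text.toList
  match pvScanPref 0 lines with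
  | some j => j
  | none =>
    match pvScanFetch 0 lines with
    | some j => j
    | none => -1

-- ===== PORT B =====
-- B's single loop: return on a preferred line, otherwise remember the first fetch( line
def pvScanB (i fb : Int) : List (List Char) → Int
  | [] => fb
  | l :: ls =>
      if pvPref l then i
      else pvScanB (i + 1) (if pvHasFetch l = true ∧ fb = -1 then i else fb) ls

def first_ollama_fetch_line_py_alt (text : String) : Int :=
  pvScanB 0 (-1) (pvSplitKeep [] text.toList)

-- ===== PRECONDITION & SPEC =====
def Spec_first_ollama_fetch_line_py (text : String) (out : Int) : Prop := out = first_ollama_fetch_line_py_alt text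
instance (text : String) (out : Int) : Decidable (Spec_first_ollama_fetch_line_py text out) := by unfold Spec_first_ollama_fetch_line_py; infer_instance

-- ===== CLAIM (what is proved, stated in full; the proofs are below) =====
def Claim_equal_first_ollama_fetch_line_py : Prop := ∀ (text : String), Dom_first_ollama_fetch_line_py text → Spec_first_ollama_fetch_line_py text (first_ollama_fetch_line_py text)

-- ===== LEMMAS AND PROOFS =====

-- loop invariant: B's single pass equals A's two scans, given that the fallback is
-- either still -1 or a nonnegative recorded index
theorem pvScanB_eq (ls : List (List Char)) : ∀ (i fb : Int), 0 ≤ i → (fb = -1 ∨ 0 ≤ fb) →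
    pvScanB i fb ls =
      (match pvScanPref i ls with
       | some j => j
       | none =>
         if fb = -1 then
           (match pvScanFetch i ls with
            | some j => j
            | none => -1)
         else fb) := by
  induction ls with
  | nil => intro i fb hi hfb; simp [pvScanB, pvScanPref, pvScanFetch]
  | cons l ls ih =>
    intro i fb hi hfb
    by_cases hp : pvPref l = true
    · simp [pvScanB, pvScanPref, hp]
    · by_cases hf : pvHasFetch l = true
      · by_cases hfbz : fb = -1
        · have := ih (i + 1) i (by omega) (Or.inr hi)
          simp [pvScanB, pvScanPref, pvScanFetch, hp, hf, hfbz, this]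
          cases pvScanPref (i + 1) ls <;> simp; omega
        · have := ih (i + 1) fb (by omega) hfb
          simp [pvScanB, pvScanPref, hp, hf, hfbz, this]
      · have := ih (i + 1) fb (by omega) hfb
        simp [pvScanB, pvScanPref, pvScanFetch, hp, hf, this]

-- ===== VERDICT (by name: the statement is the Claim_ definition above) =====
theorem first_ollama_fetch_line_py_spec : Claim_equal_first_ollama_fetch_line_py := by
  intro text _
  unfold Spec_first_ollama_fetch_line_py first_ollama_fetch_line_py first_ollama_fetch_line_py_alt
  rw [pvScanB_eq _ 0 (-1) (by omega) (Or.inl rfl)]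
  simp
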